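-- pv_equiv track=rewrite | github.com/tcl326/advent-of-code-2023 | d22-sand.py | part2
-- ===== SOURCE A (Python) =====
-- from typing import List, Tuple, Dict, Set
-- import collections
--
-- def part2(graph: Dict[str, Set[str]]) -> int:
--     depends = graph
--     supports = collections.defaultdict(set)
--
--     for n, deps in depends.items():
--         for d in deps:
--             supports[d].add(n)
--
--     def would_fall(d: str):
--         fallen = set()
--         queue = collections.deque([d])
--         while queue:
--             n = queue.popleft()
--             fallen.add(n)
--             for s in supports[n]:
--                 # get all the nodes supported by 'd'
--                 if set(depends[s]) - fallen:
--                     # if the supported node has more than one support it won't fall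
--                     continue
--                 # if the supported node is only supported by 'd' it will fall
--                 fallen.add(s)
--                 queue.append(s)
--         return len(fallen) - 1
--
--     res = 0
--     for d in depends.keys():
--         res += would_fall(d)
--     return res
-- ===== SOURCE B (Python) =====
-- def part2(graph):
--     # Round-based saturation instead of A's supports-map + BFS queue:
--     # only nodes whose dependencies are all keys can ever fall; for each
--     # removed node d, repeatedly add every candidate all of whose
--     # dependencies have already fallen, until a round adds nothing.
--     keys = list(graph)
--     keyset = set(keys)
--     cand = [s for s in keys if graph[s] and set(graph[s]) <= keyset]
--     total = 0
--     for d in keys: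
--         fallen = {d}
--         for _ in range(len(keys)):
--             new = [s for s in cand
--                    if s not in fallen and set(graph[s]) <= fallen]
--             if not new:
--                 break
--             fallen.update(new)
--         total += len(fallen) - 1
--     return total
-- ===== Notes on version B (the rewrite author's own statement) =====
-- stated objective: simpler
-- what changed: replaces A's reverse-supports index plus per-node BFS worklist queue with a per-node round-based saturation (repeatedly add every node all of whose dependencies have already fallen until a round adds nothing): no supports map, no queue
-- outside the precondition, e.g. on part2({'a': {'b', 'c'}, 'b': {'a', 'c'}, 'c': set()}): A returns 0, B returns 0
import Mathlib
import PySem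

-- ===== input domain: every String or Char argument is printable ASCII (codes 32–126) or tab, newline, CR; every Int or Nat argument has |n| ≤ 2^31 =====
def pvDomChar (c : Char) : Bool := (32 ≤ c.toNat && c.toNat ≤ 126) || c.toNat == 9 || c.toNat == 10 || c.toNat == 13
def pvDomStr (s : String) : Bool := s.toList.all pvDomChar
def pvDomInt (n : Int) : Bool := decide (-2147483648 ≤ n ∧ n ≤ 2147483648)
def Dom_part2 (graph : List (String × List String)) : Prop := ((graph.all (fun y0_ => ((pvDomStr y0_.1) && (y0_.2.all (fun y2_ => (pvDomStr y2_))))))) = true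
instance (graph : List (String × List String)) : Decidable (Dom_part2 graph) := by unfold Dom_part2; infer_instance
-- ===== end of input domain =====

-- B replaces A's reverse-supports index + per-node BFS queue by a per-node round-based
-- saturation; objective: simpler (no speed claim).

-- ===== PORT A =====
-- supports = defaultdict(set); for n, deps in depends.items(): for d in deps: supports[d].add(n)
def supportsOf (graph : List (String × List String)) : PySem.Dict String (PySem.Set String) :=
  (PySem.Dict.mk graph).items.foldl
    (fun sup p => p.2.foldl (fun sup d => sup.modify d [] (fun s => PySem.Set.add s p.1)) sup)
    PySem.Dict.empty

-- one step of the inner `for s in supports[n]` loop (depends[s] never raises: every s in a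
-- supports value is a key of depends, so getD is exact there)
def innerStep (depends : PySem.Dict String (List String)) :
    (List String × PySem.Set String) → String → (List String × PySem.Set String) :=
  fun st s =>
    if PySem.Set.diff (PySem.Set.ofList (depends.getD s [])) st.2 ≠ [] then st
    else (st.1 ++ [s], PySem.Set.add st.2 s)

-- fuel for A's `while queue:` loop; proved sufficient under Pre_part2 below (the Python
-- loop can run forever on cyclic inputs, which Pre_part2 excludes)
def fuelA (graph : List (String × List String)) : Nat := (graph.length + 2) ^ (graph.length + 2)

-- the `while queue:` loop of would_fall: pop n, add n to fallen, scan supports[n]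
def part2Loop (depends : PySem.Dict String (List String))
    (supports : PySem.Dict String (PySem.Set String)) :
    Nat → List String → PySem.Set String → PySem.Set String
  | 0, _, fallen => fallen
  | _ + 1, [], fallen => fallen
  | fuel + 1, n :: rest, fallen =>
      let st := (supports.getD n []).foldl (innerStep depends) (rest, PySem.Set.add fallen n)
      part2Loop depends supports fuel st.1 st.2

def part2 (graph : List (String × List String)) : Int :=
  (PySem.Dict.mk graph).keys.foldl
    (fun res d =>
      res + (PySem.Set.len
        (part2Loop (PySem.Dict.mk graph) (supportsOf graph) (fuelA graph) [d] PySem.Set.empty) - 1))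
    0

-- ===== PORT B =====
-- cand: the nodes that can ever fall — nonempty dependencies, all of them keys
def candOf (graph : List (String × List String)) : List String :=
  (PySem.Dict.mk graph).keys.filter (fun s =>
    !((PySem.Dict.mk graph).getD s []).isEmpty &&
    PySem.Set.issubset (PySem.Set.ofList ((PySem.Dict.mk graph).getD s []))
      (PySem.Set.ofList (PySem.Dict.mk graph).keys))

-- the bounded saturation loop of Source B: at most len(keys) rounds, each round collects
-- `new` from the candidates and stops early when it is empty
def roundsB (graph : List (String × List String)) (cand : List String) :
    Nat → PySem.Set String → PySem.Set String
  | 0, fallen => fallen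
  | k + 1, fallen =>
      let nw := cand.filter (fun s =>
        !(PySem.Set.contains fallen s) &&
        PySem.Set.issubset (PySem.Set.ofList ((PySem.Dict.mk graph).getD s [])) fallen)
      if nw.isEmpty then fallen else roundsB graph cand k (PySem.Set.update fallen nw)

def part2_alt (graph : List (String × List String)) : Int :=
  (PySem.Dict.mk graph).keys.foldl
    (fun total d =>
      total + (PySem.Set.len
        (roundsB graph (candOf graph) ((PySem.Dict.mk graph).keys).length
          (PySem.Set.add PySem.Set.empty d)) - 1))
    0

-- ===== PRECONDITION & SPEC =====
-- one peeling step: keep the keys that still have a dependency among the remaining keys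
def peelStep (graph : List (String × List String)) (rem : List String) : List String :=
  rem.filter (fun s => ((PySem.Dict.mk graph).getD s []).any (fun n => rem.contains n))

-- Pre_ excludes duplicate keys (the assoc list does not describe a Python dict there) and
-- graphs whose dependency relation among keys has a cycle: on cyclic inputs A's BFS can
-- re-enqueue the cycle forever and diverge (on some cyclic inputs A still returns — see cites).
def Pre_part2 (graph : List (String × List String)) : Prop :=
  (graph.map Prod.fst).Nodup ∧ (peelStep graph)^[graph.length] (graph.map Prod.fst) = []
instance (graph : List (String × List String)) : Decidable (Pre_part2 graph) := by
  unfold Pre_part2; infer_instance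

def pvWitness_part2 : (List (String × List String)) := [("a", ["b"]), ("b", [])]

def Spec_part2 (graph : List (String × List String)) (out : Int) : Prop := out = part2_alt graph
instance (graph : List (String × List String)) (out : Int) : Decidable (Spec_part2 graph out) := by unfold Spec_part2; infer_instance

-- ===== CLAIM (what is proved, stated in full; the proofs are below) =====
def Claim_equal_part2 : Prop := ∀ (graph : List (String × List String)), Dom_part2 graph → Pre_part2 graph → Spec_part2 graph (part2 graph)

-- ===== LEMMAS AND PROOFS =====

-- keys / dependency lookup of the input dict, as used by both ports
def gKeys (g : List (String × List String)) : List String := (PySem.Dict.mk g).keys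
def gDeps (g : List (String × List String)) (s : String) : List String :=
  (PySem.Dict.mk g).getD s []

-- the cascade relation both programs compute: x falls when d is removed
inductive Falls (g : List (String × List String)) (d : String) : String → Prop
  | base : Falls g d d
  | step (s : String) (hs : s ∈ gKeys g) (hne : gDeps g s ≠ [])
      (h : ∀ n ∈ gDeps g s, Falls g d n) : Falls g d s

lemma nodup_subset_length {α : Type} [DecidableEq α] {l1 l2 : List α} (h : l1.Nodup) (hs : l1 ⊆ l2) :
    l1.length ≤ l2.length := by
  classical
  calc l1.length = l1.toFinset.card := (List.toFinset_card_of_nodup h).symm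
    _ ≤ l2.toFinset.card := by
        apply Finset.card_le_card
        intro a ha
        simp only [List.mem_toFinset] at *
        exact hs ha
    _ ≤ l2.length := l2.toFinset_card_le

-- ---- supports characterisation ----

lemma getD_supports_inner (m : String) (ds : List String)
    (sup : PySem.Dict String (PySem.Set String)) (n : String) :
    ((ds.foldl (fun sup d => sup.modify d [] (fun s => PySem.Set.add s m)) sup).getD n [])
      = if n ∈ ds then PySem.Set.add (sup.getD n []) m else sup.getD n [] := by
  induction ds generalizing sup with
  | nil => simp
  | cons c ds ih =>
      simp only [List.foldl_cons, ih, PySem.Dict.getD_modify, List.mem_cons]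
      by_cases h1 : n ∈ ds <;> by_cases h2 : n = c <;>
        simp [h1, h2, PySem.Set.add_of_mem, PySem.Set.mem_add]

lemma mem_getD_supports_acc (l : List (String × List String))
    (sup : PySem.Dict String (PySem.Set String)) (n x : String) :
    (x ∈ (l.foldl
        (fun sup p => p.2.foldl (fun sup d => sup.modify d [] (fun s => PySem.Set.add s p.1)) sup)
        sup).getD n [])
      ↔ x ∈ sup.getD n [] ∨ ∃ p ∈ l, x = p.1 ∧ n ∈ p.2 := by
  induction l generalizing sup with
  | nil => simp
  | cons p l ih =>
      simp only [List.foldl_cons, ih, getD_supports_inner, List.mem_cons]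
      by_cases h : n ∈ p.2 <;>
        simp [h, PySem.Set.mem_add] <;> tauto

lemma mem_getD_supports (g : List (String × List String)) (n x : String)
    (hk : (g.map Prod.fst).Nodup) :
    x ∈ (supportsOf g).getD n [] ↔ x ∈ gKeys g ∧ n ∈ gDeps g x := by
  have hit : (PySem.Dict.mk g).items = g := rfl
  unfold supportsOf
  rw [hit, mem_getD_supports_acc]
  simp only [PySem.Dict.getD_empty, List.not_mem_nil, false_or]
  constructor
  · rintro ⟨p, hp, rfl, hn⟩
    have hk' : (PySem.Dict.mk g).keys.Nodup := by simpa [PySem.Dict.keys_mk] using hk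
    have h1 : p.1 ∈ g.map Prod.fst := List.mem_map.mpr ⟨p, hp, rfl⟩
    refine ⟨by simpa [gKeys, PySem.Dict.keys_mk] using h1, ?_⟩
    have : (PySem.Dict.mk g).getD p.1 [] = p.2 :=
      PySem.Dict.getD_of_mem_items (d := PySem.Dict.mk g) (k := p.1) (v := p.2)
        (by simpa [hit]) hk' []
    simpa [gDeps, this] using hn
  · rintro ⟨hxk, hn⟩
    have hk' : (PySem.Dict.mk g).keys.Nodup := by simpa [PySem.Dict.keys_mk] using hk
    have : x ∈ g.map Prod.fst := by simpa [gKeys, PySem.Dict.keys_mk] using hxk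
    obtain ⟨p, hp, hpx⟩ := List.mem_map.mp this
    refine ⟨p, hp, hpx.symm, ?_⟩
    have : (PySem.Dict.mk g).getD p.1 [] = p.2 :=
      PySem.Dict.getD_of_mem_items (d := PySem.Dict.mk g) (k := p.1) (v := p.2)
        (by simpa [hit]) hk' []
    rw [hpx] at this
    simpa [gDeps, this] using hn

lemma nodup_getD_supports_acc (l : List (String × List String))
    (sup : PySem.Dict String (PySem.Set String))
    (h : ∀ n, (sup.getD n []).Nodup) (n : String) :
    ((l.foldl
        (fun sup p => p.2.foldl (fun sup d => sup.modify d [] (fun s => PySem.Set.add s p.1)) sup)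
        sup).getD n []).Nodup := by
  induction l generalizing sup with
  | nil => exact h n
  | cons p l ih =>
      simp only [List.foldl_cons]
      apply ih
      intro m
      rw [getD_supports_inner]
      split
      · exact PySem.Set.nodup_add _ _ (h m)
      · exact h m

lemma nodup_getD_supports (g : List (String × List String)) (n : String) :
    ((supportsOf g).getD n []).Nodup := by
  unfold supportsOf
  exact nodup_getD_supports_acc g PySem.Dict.empty (by simp) n

-- ---- peeling rank ----

def pvR (g : List (String × List String)) (k : Nat) : List String :=
  (peelStep g)^[k] (g.map Prod.fst)

def pvCnt (g : List (String × List String)) (s : String) : Nat :=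
  ((List.range g.length).filter (fun k => (pvR g k).contains s)).length

def pvW (g : List (String × List String)) (s : String) : Nat :=
  (g.length + 1) ^ (g.length - pvCnt g s)

def pvPhi (g : List (String × List String)) (q : List String) : Nat :=
  (q.map (pvW g)).sum

lemma pvR_succ (g : List (String × List String)) (k : Nat) :
    pvR g (k + 1) = peelStep g (pvR g k) := by
  simp [pvR, Function.iterate_succ_apply']

lemma pvR_mono (g : List (String × List String)) {j k : Nat} (h : j ≤ k) :
    pvR g k ⊆ pvR g j := by
  induction k with
  | zero => simp_all
  | succ k ih =>
      rcases Nat.lt_or_ge j (k + 1) with hlt | hge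
      · intro x hx
        rw [pvR_succ] at hx
        exact ih (by omega) (List.mem_of_mem_filter hx)
      · have : j = k + 1 := by omega
        subst this; exact fun x hx => hx

lemma mem_pvR_iff_lt_cnt (g : List (String × List String))
    (hpre : (peelStep g)^[g.length] (g.map Prod.fst) = []) (s : String) (j : Nat) :
    s ∈ pvR g j ↔ j < pvCnt g s := by
  have hlen : pvR g g.length = [] := hpre
  constructor
  · intro hj
    have hjlt : j < g.length := by
      by_contra hge
      have : s ∈ pvR g g.length := pvR_mono g (by omega) hj
      simp [hlen] at this
    have hsub : List.range (j + 1) ⊆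
        (List.range g.length).filter (fun k => (pvR g k).contains s) := by
      intro k hkmem
      have hk : k < j + 1 := List.mem_range.mp hkmem
      refine List.mem_filter.mpr ⟨List.mem_range.mpr (by omega), ?_⟩
      have : s ∈ pvR g k := pvR_mono g (by omega) hj
      simpa using this
    have := nodup_subset_length (List.nodup_range) hsub
    simpa [pvCnt] using this
  · intro hlt
    by_contra hns
    have hsub : (List.range g.length).filter (fun k => (pvR g k).contains s) ⊆
        List.range j := by
      intro k hk
      have hk' := List.mem_filter.mp hk
      have hks : s ∈ pvR g k := by simpa using hk'.2
      refine List.mem_range.mpr ?_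
      by_contra hge
      exact hns (pvR_mono g (by omega) hks)
    have := nodup_subset_length ((List.nodup_range).filter _) hsub
    simp only [List.length_range] at this
    unfold pvCnt at hlt
    omega

lemma cnt_le (g : List (String × List String)) (s : String) : pvCnt g s ≤ g.length := by
  have := List.length_filter_le (fun k => (pvR g k).contains s) (List.range g.length)
  simpa [pvCnt] using this

lemma cnt_lt_cnt (g : List (String × List String))
    (hpre : (peelStep g)^[g.length] (g.map Prod.fst) = [])
    {s n : String} (hs : s ∈ g.map Prod.fst) (hn : n ∈ gDeps g s) (_hnK : n ∈ g.map Prod.fst) :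
    pvCnt g n < pvCnt g s := by
  have key : ∀ k, k ≤ pvCnt g n → s ∈ pvR g k := by
    intro k
    induction k with
    | zero => intro _; exact hs
    | succ k ih =>
        intro hk
        have hsk : s ∈ pvR g k := ih (by omega)
        have hnk : n ∈ pvR g k := (mem_pvR_iff_lt_cnt g hpre n k).mpr (by omega)
        rw [pvR_succ]
        refine List.mem_filter.mpr ⟨hsk, ?_⟩
        simp only [List.any_eq_true]
        exact ⟨n, by simpa [gDeps] using hn, by simpa using hnk⟩
  exact (mem_pvR_iff_lt_cnt g hpre s (pvCnt g n)).mp (key _ le_rfl)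

lemma one_le_pvW (g : List (String × List String)) (s : String) : 1 ≤ pvW g s := by
  exact Nat.one_le_pow _ _ (by omega)

lemma phi_add_lt (g : List (String × List String))
    (hpre : (peelStep g)^[g.length] (g.map Prod.fst) = [])
    {n : String} (hn : n ∈ g.map Prod.fst)
    {add : List String} (hlen : add.length ≤ g.length)
    (hadd : ∀ x ∈ add, x ∈ g.map Prod.fst ∧ n ∈ gDeps g x) :
    pvPhi g add < pvW g n := by
  rcases add with _ | ⟨a, add'⟩
  · simpa [pvPhi] using one_le_pvW g n
  · have hcnt : ∀ x ∈ a :: add', pvCnt g n < pvCnt g x := by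
      intro x hx
      obtain ⟨hxk, hnd⟩ := hadd x hx
      exact cnt_lt_cnt g hpre hxk hnd hn
    have hna : pvCnt g n + 1 ≤ g.length := by
      have h1 := hcnt a (by simp)
      have h2 := cnt_le g a
      omega
    set L := g.length with hL
    set B := (L + 1) ^ (L - pvCnt g n - 1) with hB
    have hbd : ∀ y ∈ (a :: add').map (pvW g), y ≤ B := by
      intro y hy
      obtain ⟨x, hx, rfl⟩ := List.mem_map.mp hy
      have hxc := hcnt x hx
      exact Nat.pow_le_pow_right (by omega) (by omega)
    have hsum : ((a :: add').map (pvW g)).sum ≤ ((a :: add').map (pvW g)).length • B :=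
      List.sum_le_card_nsmul _ _ hbd
    have hBpos : 1 ≤ B := Nat.one_le_pow _ _ (by omega)
    have hlen' : ((a :: add').map (pvW g)).length ≤ L := by
      simpa using hlen
    have hfin : ((a :: add').map (pvW g)).length • B ≤ L * B := by
      simpa [smul_eq_mul] using Nat.mul_le_mul_right B hlen'
    have hlt : L * B < (L + 1) * B := by
      exact Nat.mul_lt_mul_of_lt_of_le (by omega) le_rfl (by omega)
    have hpow : (L + 1) * B = (L + 1) ^ (L - pvCnt g n) := by
      rw [hB]
      rw [← pow_succ']
      congr 1
      omega
    have : pvPhi g (a :: add') < (L + 1) ^ (L - pvCnt g n) := by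
      calc pvPhi g (a :: add') = ((a :: add').map (pvW g)).sum := rfl
        _ ≤ ((a :: add').map (pvW g)).length • B := hsum
        _ ≤ L * B := hfin
        _ < (L + 1) * B := hlt
        _ = (L + 1) ^ (L - pvCnt g n) := hpow
    simpa [pvW] using this

-- ---- the inner for-loop of A ----

lemma diff_nil_iff (ds : List String) (fl : PySem.Set String) :
    PySem.Set.diff (PySem.Set.ofList ds) fl = [] ↔ ∀ m ∈ ds, m ∈ fl := by
  simp [List.eq_nil_iff_forall_not_mem, PySem.Set.mem_diff, PySem.Set.mem_ofList]

lemma innerFold (g : List (String × List String)) (d nn : String)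
    (lst : List String) (hlst : ∀ s ∈ lst, s ∈ gKeys g ∧ nn ∈ gDeps g s) :
    ∀ (q0 : List String) (fl0 : PySem.Set String), fl0.Nodup → (∀ x ∈ fl0, Falls g d x) →
    ∃ add : List String,
      (lst.foldl (innerStep (PySem.Dict.mk g)) (q0, fl0)).1 = q0 ++ add ∧
      add.length ≤ lst.length ∧
      (∀ x ∈ add, x ∈ lst) ∧
      (∀ x, x ∈ (lst.foldl (innerStep (PySem.Dict.mk g)) (q0, fl0)).2 ↔ x ∈ fl0 ∨ x ∈ add) ∧
      (lst.foldl (innerStep (PySem.Dict.mk g)) (q0, fl0)).2.Nodup ∧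
      (∀ x ∈ (lst.foldl (innerStep (PySem.Dict.mk g)) (q0, fl0)).2, Falls g d x) ∧
      (∀ s ∈ lst, (∀ m ∈ gDeps g s, m ∈ (lst.foldl (innerStep (PySem.Dict.mk g)) (q0, fl0)).2) →
        s ∈ (lst.foldl (innerStep (PySem.Dict.mk g)) (q0, fl0)).2 ∨ ∃ m ∈ gDeps g s, m ∈ add) := by
  induction lst with
  | nil =>
      intro q0 fl0 hnd hF
      exact ⟨[], by simp, by simp, by simp, by simp, hnd, hF, by simp⟩
  | cons s lst ih =>
      intro q0 fl0 hnd hF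
      have hsKey := hlst s (by simp)
      have hlst' : ∀ t ∈ lst, t ∈ gKeys g ∧ nn ∈ gDeps g t := fun t ht => hlst t (by simp [ht])
      by_cases hcond : PySem.Set.diff (PySem.Set.ofList ((PySem.Dict.mk g).getD s [])) fl0 = []
      · -- all dependencies of s already fallen: s is appended and added
        have hstep : innerStep (PySem.Dict.mk g) (q0, fl0) s
            = (q0 ++ [s], PySem.Set.add fl0 s) := by
          simp [innerStep, hcond]
        have hdeps : ∀ m ∈ gDeps g s, m ∈ fl0 := (diff_nil_iff _ _).mp hcond
        have hFs : Falls g d s :=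
          Falls.step s hsKey.1 (List.ne_nil_of_mem hsKey.2) (fun m hm => hF m (hdeps m hm))
        have hnd1 : (PySem.Set.add fl0 s).Nodup := PySem.Set.nodup_add _ _ hnd
        have hF1 : ∀ x ∈ PySem.Set.add fl0 s, Falls g d x := by
          intro x hx
          rcases (PySem.Set.mem_add fl0 s x).mp hx with h | rfl
          · exact hF x h
          · exact hFs
        obtain ⟨add', h1, h2, h3, h4, h5, h6, h7⟩ := ih hlst' (q0 ++ [s]) (PySem.Set.add fl0 s) hnd1 hF1
        refine ⟨s :: add', ?_, ?_, ?_, ?_, ?_, ?_, ?_⟩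
        · simp only [List.foldl_cons, hstep] at *
          simpa using h1
        · simpa using Nat.succ_le_succ h2
        · intro x hx
          rcases List.mem_cons.mp hx with rfl | hx
          · simp
          · simp [h3 x hx]
        · intro x
          simp only [List.foldl_cons, hstep]
          rw [h4 x]
          simp only [PySem.Set.mem_add, List.mem_cons]
          tauto
        · simpa only [List.foldl_cons, hstep] using h5
        · simpa only [List.foldl_cons, hstep] using h6
        · intro t ht hmem
          simp only [List.foldl_cons, hstep] at hmem ⊢
          rcases List.mem_cons.mp ht with rfl | ht'
          · left
            rw [h4 t]
            exact Or.inl ((PySem.Set.mem_add fl0 t t).mpr (Or.inr rfl))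
          · rcases h7 t ht' hmem with h | ⟨m, hm1, hm2⟩
            · exact Or.inl h
            · exact Or.inr ⟨m, hm1, by simp [hm2]⟩
      · -- some dependency of s not yet fallen: s is skipped here
        have hstep : innerStep (PySem.Dict.mk g) (q0, fl0) s = (q0, fl0) := by
          simp [innerStep, hcond]
        obtain ⟨add, h1, h2, h3, h4, h5, h6, h7⟩ := ih hlst' q0 fl0 hnd hF
        refine ⟨add, ?_, ?_, ?_, ?_, ?_, ?_, ?_⟩
        · simpa only [List.foldl_cons, hstep] using h1
        · exact h2.trans (by simp)
        · intro x hx; simp [h3 x hx]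
        · intro x; simpa only [List.foldl_cons, hstep] using h4 x
        · simpa only [List.foldl_cons, hstep] using h5
        · simpa only [List.foldl_cons, hstep] using h6
        · intro t ht hmem
          simp only [List.foldl_cons, hstep] at hmem ⊢
          rcases List.mem_cons.mp ht with rfl | ht'
          · -- the failing dependency of t is in fl' but not fl0, hence in add
            obtain ⟨m, hm1, hm2⟩ : ∃ m ∈ (PySem.Dict.mk g).getD t [], m ∉ fl0 := by
              by_contra hall
              push_neg at hall
              exact hcond ((diff_nil_iff _ _).mpr hall)
            have hmres : m ∈ (lst.foldl (innerStep (PySem.Dict.mk g)) (q0, fl0)).2 :=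
              hmem m hm1
            rcases (h4 m).mp hmres with h | h
            · exact absurd h hm2
            · exact Or.inr ⟨m, hm1, h⟩
          · exact h7 t ht' hmem

-- ---- the while-loop of A ----

lemma gKeys_eq (g : List (String × List String)) : gKeys g = g.map Prod.fst := by
  simp [gKeys, PySem.Dict.keys_mk]

lemma loopMain (g : List (String × List String))
    (hk : (g.map Prod.fst).Nodup)
    (hpre : (peelStep g)^[g.length] (g.map Prod.fst) = []) (d : String) :
    ∀ (fuel : Nat) (q : List String) (fl : PySem.Set String),
      pvPhi g q < fuel →
      (∀ x ∈ q, x ∈ gKeys g) →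
      (∀ x ∈ q, Falls g d x) →
      (∀ x ∈ fl, x ∈ gKeys g) →
      fl.Nodup →
      (∀ x ∈ fl, Falls g d x) →
      (∀ s ∈ gKeys g, gDeps g s ≠ [] → (∀ m ∈ gDeps g s, m ∈ fl) →
        ((∃ m ∈ gDeps g s, m ∈ q) ∨ s ∈ fl)) →
      (part2Loop (PySem.Dict.mk g) (supportsOf g) fuel q fl).Nodup ∧
      (∀ x ∈ part2Loop (PySem.Dict.mk g) (supportsOf g) fuel q fl, Falls g d x) ∧
      (∀ x ∈ fl, x ∈ part2Loop (PySem.Dict.mk g) (supportsOf g) fuel q fl) ∧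
      (∀ x ∈ q, x ∈ part2Loop (PySem.Dict.mk g) (supportsOf g) fuel q fl) ∧
      (∀ s ∈ gKeys g, gDeps g s ≠ [] →
        (∀ m ∈ gDeps g s, m ∈ part2Loop (PySem.Dict.mk g) (supportsOf g) fuel q fl) →
        s ∈ part2Loop (PySem.Dict.mk g) (supportsOf g) fuel q fl) := by
  intro fuel
  induction fuel with
  | zero =>
      intro q fl hphi _ _ _ _ _ _
      exact absurd hphi (Nat.not_lt_zero _)
  | succ fuel ih =>
      intro q fl hphi hqK hqF hflK hflnd hflF hQ
      cases q with
      | nil =>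
          simp only [part2Loop]
          refine ⟨hflnd, hflF, fun x hx => hx, by simp, ?_⟩
          intro s hsK hne hmem
          rcases hQ s hsK hne hmem with ⟨m, _, hmq⟩ | h
          · simp at hmq
          · exact h
      | cons n rest =>
          have hnK : n ∈ gKeys g := hqK n (by simp)
          have hlstprop : ∀ s ∈ (supportsOf g).getD n [], s ∈ gKeys g ∧ n ∈ gDeps g s :=
            fun s hs => (mem_getD_supports g n s hk).mp hs
          have hnd1 : (PySem.Set.add fl n).Nodup := PySem.Set.nodup_add _ _ hflnd
          have hF1 : ∀ x ∈ PySem.Set.add fl n, Falls g d x := by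
            intro x hx
            rcases (PySem.Set.mem_add fl n x).mp hx with h | he
            · exact hflF x h
            · exact he ▸ hqF n (by simp)
          obtain ⟨add, h1, h2, h3, h4, h5, h6, h7⟩ :=
            innerFold g d n ((supportsOf g).getD n []) hlstprop rest (PySem.Set.add fl n) hnd1 hF1
          have hunfold : part2Loop (PySem.Dict.mk g) (supportsOf g) (fuel + 1) (n :: rest) fl
              = part2Loop (PySem.Dict.mk g) (supportsOf g) fuel
                  (((supportsOf g).getD n []).foldl (innerStep (PySem.Dict.mk g))
                    (rest, PySem.Set.add fl n)).1
                  (((supportsOf g).getD n []).foldl (innerStep (PySem.Dict.mk g))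
                    (rest, PySem.Set.add fl n)).2 := rfl
          set st := ((supportsOf g).getD n []).foldl (innerStep (PySem.Dict.mk g))
            (rest, PySem.Set.add fl n) with hst
          -- bound the potential of the appended nodes
          have hlstlen : ((supportsOf g).getD n []).length ≤ g.length := by
            have h := nodup_subset_length (nodup_getD_supports g n)
              (fun x hx => by
                have := (hlstprop x hx).1
                rw [gKeys_eq] at this
                exact this)
            simpa using h
          have haddlen : add.length ≤ g.length := h2.trans hlstlen
          have haddprop : ∀ x ∈ add, x ∈ g.map Prod.fst ∧ n ∈ gDeps g x := by
            intro x hx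
            have := hlstprop x (h3 x hx)
            exact ⟨by rw [← gKeys_eq]; exact this.1, this.2⟩
          have hphiadd : pvPhi g add < pvW g n :=
            phi_add_lt g hpre (by rw [← gKeys_eq]; exact hnK) haddlen haddprop
          have hphi1 : pvPhi g st.1 < fuel := by
            rw [h1]
            have e1 : pvPhi g (rest ++ add) = pvPhi g rest + pvPhi g add := by
              simp [pvPhi]
            have e2 : pvPhi g (n :: rest) = pvW g n + pvPhi g rest := by
              simp [pvPhi]
            omega
          have hq1K : ∀ x ∈ st.1, x ∈ gKeys g := by
            rw [h1]
            intro x hx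
            rcases List.mem_append.mp hx with h | h
            · exact hqK x (by simp [h])
            · exact (hlstprop x (h3 x h)).1
          have hq1F : ∀ x ∈ st.1, Falls g d x := by
            rw [h1]
            intro x hx
            rcases List.mem_append.mp hx with h | h
            · exact hqF x (by simp [h])
            · exact h6 x ((h4 x).mpr (Or.inr h))
          have hfl1K : ∀ x ∈ st.2, x ∈ gKeys g := by
            intro x hx
            rcases (h4 x).mp hx with h | h
            · rcases (PySem.Set.mem_add fl n x).mp h with h' | rfl
              · exact hflK x h'
              · exact hnK
            · exact (hlstprop x (h3 x h)).1
          have hQ1 : ∀ s ∈ gKeys g, gDeps g s ≠ [] → (∀ m ∈ gDeps g s, m ∈ st.2) →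
              ((∃ m ∈ gDeps g s, m ∈ st.1) ∨ s ∈ st.2) := by
            intro s hsK hne hmem
            by_cases hns : n ∈ gDeps g s
            · have hslst : s ∈ (supportsOf g).getD n [] :=
                (mem_getD_supports g n s hk).mpr ⟨hsK, hns⟩
              rcases h7 s hslst hmem with h | ⟨m, hm1, hm2⟩
              · exact Or.inr h
              · exact Or.inl ⟨m, hm1, by rw [h1]; exact List.mem_append.mpr (Or.inr hm2)⟩
            · by_cases hma : ∃ m ∈ gDeps g s, m ∈ add
              · obtain ⟨m, hm1, hm2⟩ := hma
                exact Or.inl ⟨m, hm1, by rw [h1]; exact List.mem_append.mpr (Or.inr hm2)⟩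
              · push_neg at hma
                have hsub : ∀ m ∈ gDeps g s, m ∈ fl := by
                  intro m hm
                  rcases (h4 m).mp (hmem m hm) with h | h
                  · rcases (PySem.Set.mem_add fl n m).mp h with h' | rfl
                    · exact h'
                    · exact absurd hm hns
                  · exact absurd h (hma m hm)
                rcases hQ s hsK hne hsub with ⟨m, hm, hmq⟩ | hsfl
                · rcases List.mem_cons.mp hmq with rfl | hmr
                  · exact absurd hm hns
                  · exact Or.inl ⟨m, hm, by rw [h1]; exact List.mem_append.mpr (Or.inl hmr)⟩
                · exact Or.inr ((h4 s).mpr (Or.inl ((PySem.Set.mem_add fl n s).mpr (Or.inl hsfl))))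
          obtain ⟨R1, R2, R3, R4, R5⟩ := ih st.1 st.2 hphi1 hq1K hq1F hfl1K h5 h6 hQ1
          rw [hunfold]
          refine ⟨R1, R2, ?_, ?_, R5⟩
          · intro x hx
            exact R3 x ((h4 x).mpr (Or.inl ((PySem.Set.mem_add fl n x).mpr (Or.inl hx))))
          · intro x hx
            rcases List.mem_cons.mp hx with rfl | hxr
            · exact R3 x ((h4 x).mpr (Or.inl ((PySem.Set.mem_add fl x x).mpr (Or.inr rfl))))
            · exact R4 x (by rw [h1]; exact List.mem_append.mpr (Or.inl hxr))

lemma loopA_final (g : List (String × List String))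
    (hk : (g.map Prod.fst).Nodup)
    (hpre : (peelStep g)^[g.length] (g.map Prod.fst) = [])
    {d : String} (hd : d ∈ gKeys g) :
    (part2Loop (PySem.Dict.mk g) (supportsOf g) (fuelA g) [d] PySem.Set.empty).Nodup ∧
    (∀ x, x ∈ part2Loop (PySem.Dict.mk g) (supportsOf g) (fuelA g) [d] PySem.Set.empty ↔
      Falls g d x) := by
  have hphi : pvPhi g [d] < fuelA g := by
    have h1 : pvW g d ≤ (g.length + 1) ^ g.length :=
      Nat.pow_le_pow_right (by omega) (Nat.sub_le _ _)
    have h2 : (g.length + 1) ^ g.length ≤ (g.length + 2) ^ g.length :=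
      Nat.pow_le_pow_left (by omega) _
    have h3 : (g.length + 2) ^ g.length < (g.length + 2) ^ (g.length + 2) :=
      Nat.pow_lt_pow_right (by omega) (by omega)
    have h4 : pvPhi g [d] = pvW g d := by simp [pvPhi]
    unfold fuelA
    omega
  have hQ : ∀ s ∈ gKeys g, gDeps g s ≠ [] → (∀ m ∈ gDeps g s, m ∈ (PySem.Set.empty : PySem.Set String)) →
      ((∃ m ∈ gDeps g s, m ∈ [d]) ∨ s ∈ (PySem.Set.empty : PySem.Set String)) := by
    intro s _ hne hmem
    exfalso
    apply hne
    apply List.eq_nil_iff_forall_not_mem.mpr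
    intro m hm
    have := hmem m hm
    simp [PySem.Set.empty] at this
  obtain ⟨R1, R2, R3, R4, R5⟩ := loopMain g hk hpre d (fuelA g) [d] PySem.Set.empty hphi
    (by intro x hx; simp at hx; exact hx ▸ hd)
    (by intro x hx; simp at hx; exact hx ▸ Falls.base)
    (by intro x hx; simp [PySem.Set.empty] at hx)
    (by simp [PySem.Set.empty])
    (by intro x hx; simp [PySem.Set.empty] at hx)
    hQ
  refine ⟨R1, fun x => ⟨fun hx => R2 x hx, fun hF => ?_⟩⟩
  induction hF with
  | base => exact R4 d (by simp)
  | step s hs hne h ihm => exact R5 s hs hne ihm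

-- ---- the rounds of B ----

lemma mem_candOf (g : List (String × List String)) (s : String) :
    s ∈ candOf g ↔ s ∈ gKeys g ∧ gDeps g s ≠ [] ∧ ∀ m ∈ gDeps g s, m ∈ gKeys g := by
  simp [candOf, List.mem_filter, PySem.Set.issubset_iff, PySem.Set.mem_ofList, gDeps, gKeys,
    List.isEmpty_iff, and_assoc]

lemma nodup_candOf (g : List (String × List String)) (hk : (g.map Prod.fst).Nodup) :
    (candOf g).Nodup := by
  apply List.Nodup.filter
  show (gKeys g).Nodup
  rw [gKeys_eq]
  exact hk

lemma roundsLemma (g : List (String × List String))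
    (hk : (g.map Prod.fst).Nodup) (d : String) :
    ∀ (k : Nat) (fl : PySem.Set String), fl.Nodup → (∀ x ∈ fl, x ∈ gKeys g) →
      (∀ x ∈ fl, Falls g d x) →
      (roundsB g (candOf g) k fl).Nodup ∧
      (∀ x ∈ roundsB g (candOf g) k fl, x ∈ gKeys g) ∧
      (∀ x ∈ roundsB g (candOf g) k fl, Falls g d x) ∧
      (∀ x ∈ fl, x ∈ roundsB g (candOf g) k fl) ∧
      ((∀ s ∈ gKeys g, gDeps g s ≠ [] → (∀ m ∈ gDeps g s, m ∈ roundsB g (candOf g) k fl) →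
          s ∈ roundsB g (candOf g) k fl) ∨
        fl.length + k ≤ (roundsB g (candOf g) k fl).length) := by
  intro k
  induction k with
  | zero =>
      intro fl hnd hKs hF
      exact ⟨hnd, hKs, hF, fun x hx => hx, Or.inr (by show fl.length + 0 ≤ fl.length; omega)⟩
  | succ k ih =>
      intro fl hnd hKs hF
      have hmemnw : ∀ s, s ∈ (candOf g).filter (fun s =>
          !(PySem.Set.contains fl s) &&
          PySem.Set.issubset (PySem.Set.ofList ((PySem.Dict.mk g).getD s [])) fl) ↔
          s ∈ candOf g ∧ s ∉ fl ∧ ∀ m ∈ gDeps g s, m ∈ fl := by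
        intro s
        simp [List.mem_filter, PySem.Set.issubset_iff, PySem.Set.mem_ofList, gDeps, and_assoc]
      by_cases hempty : ((candOf g).filter (fun s =>
          !(PySem.Set.contains fl s) &&
          PySem.Set.issubset (PySem.Set.ofList ((PySem.Dict.mk g).getD s [])) fl)).isEmpty
      · have hred : roundsB g (candOf g) (k + 1) fl = fl := by
          simp only [roundsB, hempty]
          simp
        rw [hred]
        refine ⟨hnd, hKs, hF, fun x hx => hx, Or.inl ?_⟩
        intro s hsK hne hmem
        by_contra hsf
        have hscand : s ∈ candOf g :=
          (mem_candOf g s).mpr ⟨hsK, hne, fun m hm => hKs m (hmem m hm)⟩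
        have hsnw := (hmemnw s).mpr ⟨hscand, hsf, hmem⟩
        rw [List.isEmpty_iff.mp hempty] at hsnw
        simp at hsnw
      · set nw := (candOf g).filter (fun s =>
          !(PySem.Set.contains fl s) &&
          PySem.Set.issubset (PySem.Set.ofList ((PySem.Dict.mk g).getD s [])) fl) with hnwdef
        have hred : roundsB g (candOf g) (k + 1) fl = roundsB g (candOf g) k (PySem.Set.update fl nw) := by
          simp only [roundsB, ← hnwdef, hempty]
          simp
        have hnwnodup : nw.Nodup := List.Nodup.filter _ (nodup_candOf g hk)
        have hnwfresh : ∀ x ∈ nw, x ∉ fl := fun x hx => ((hmemnw x).mp hx).2.1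
        have hupd : PySem.Set.update fl nw = fl ++ nw :=
          PySem.Set.update_eq_append_of_disjoint fl nw hnwnodup hnwfresh
        have hnd' : (PySem.Set.update fl nw).Nodup := by
          rw [hupd]
          exact List.Nodup.append hnd hnwnodup (fun a ha hanw => hnwfresh a hanw ha)
        have hKs' : ∀ x ∈ PySem.Set.update fl nw, x ∈ gKeys g := by
          rw [hupd]
          intro x hx
          rcases List.mem_append.mp hx with h | h
          · exact hKs x h
          · exact ((mem_candOf g x).mp ((hmemnw x).mp h).1).1
        have hF' : ∀ x ∈ PySem.Set.update fl nw, Falls g d x := by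
          rw [hupd]
          intro x hx
          rcases List.mem_append.mp hx with h | h
          · exact hF x h
          · obtain ⟨hc, _, h4⟩ := (hmemnw x).mp h
            obtain ⟨h1, h3, _⟩ := (mem_candOf g x).mp hc
            exact Falls.step x h1 h3 (fun m hm => hF m (h4 m hm))
        obtain ⟨R1, R2, R3, R4, R5⟩ := ih (PySem.Set.update fl nw) hnd' hKs' hF'
        rw [hred]
        refine ⟨R1, R2, R3, ?_, ?_⟩
        · intro x hx
          exact R4 x (by rw [hupd]; exact List.mem_append.mpr (Or.inl hx))
        · rcases R5 with h | h
          · exact Or.inl h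
          · refine Or.inr ?_
            have hlen : nw.length ≠ 0 := by
              intro h0
              have hnil : nw = [] := List.eq_nil_of_length_eq_zero h0
              exact hempty (by simp [hnil])
            have : (PySem.Set.update fl nw).length = fl.length + nw.length := by
              rw [hupd]; simp
            omega

lemma roundsB_final (g : List (String × List String))
    (hk : (g.map Prod.fst).Nodup) {d : String} (hd : d ∈ gKeys g) :
    (roundsB g (candOf g) (gKeys g).length (PySem.Set.add PySem.Set.empty d)).Nodup ∧
    (∀ x, x ∈ roundsB g (candOf g) (gKeys g).length (PySem.Set.add PySem.Set.empty d) ↔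
      Falls g d x) := by
  have h0 : PySem.Set.add PySem.Set.empty d = [d] := rfl
  rw [h0]
  obtain ⟨R1, R2, R3, R4, R5⟩ := roundsLemma g hk d (gKeys g).length [d]
    (by simp)
    (by intro x hx; simp at hx; exact hx ▸ hd)
    (by intro x hx; simp at hx; exact hx ▸ Falls.base)
  have hclosed : ∀ s ∈ gKeys g, gDeps g s ≠ [] →
      (∀ m ∈ gDeps g s, m ∈ roundsB g (candOf g) (gKeys g).length [d]) →
      s ∈ roundsB g (candOf g) (gKeys g).length [d] := by
    rcases R5 with h | h
    · exact h
    · exfalso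
      have hle : (roundsB g (candOf g) (gKeys g).length [d]).length ≤ (gKeys g).length := by
        apply nodup_subset_length R1 R2
      simp at h
      omega
  refine ⟨R1, fun x => ⟨fun hx => R3 x hx, fun hF => ?_⟩⟩
  induction hF with
  | base => exact R4 d (by simp)
  | step s hs hne h ihm => exact hclosed s hs hne ihm

theorem part2_spec_aux (g : List (String × List String))
    (hk : (g.map Prod.fst).Nodup)
    (hacyc : (peelStep g)^[g.length] (g.map Prod.fst) = []) :
    part2 g = part2_alt g := by
  unfold part2 part2_alt
  apply PySem.List.foldl_congr_mem
  intro acc d hd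
  have hd' : d ∈ gKeys g := hd
  obtain ⟨na, ia⟩ := loopA_final g hk hacyc hd'
  obtain ⟨nb, ib⟩ := roundsB_final g hk hd'
  have hperm : (part2Loop (PySem.Dict.mk g) (supportsOf g) (fuelA g) [d] PySem.Set.empty).Perm
      (roundsB g (candOf g) (gKeys g).length (PySem.Set.add PySem.Set.empty d)) :=
    (List.perm_ext_iff_of_nodup na nb).mpr (fun a => (ia a).trans (ib a).symm)
  have hlen : (part2Loop (PySem.Dict.mk g) (supportsOf g) (fuelA g) [d] []).length
      = (roundsB g (candOf g) (gKeys g).length [d]).length := hperm.length_eq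
  have hkl : (gKeys g).length = g.length := by simp [gKeys_eq]
  rw [hkl] at hlen
  show acc + (PySem.Set.len (part2Loop (PySem.Dict.mk g) (supportsOf g) (fuelA g) [d] PySem.Set.empty) - 1)
      = acc + (PySem.Set.len (roundsB g (candOf g) ((PySem.Dict.mk g).keys).length (PySem.Set.add PySem.Set.empty d)) - 1)
  simp [PySem.Set.len, hlen]

-- ===== VERDICT (by name: the statement is the Claim_ definition above) =====
theorem part2_spec : Claim_equal_part2 := by
  intro g _ hpre
  exact part2_spec_aux g hpre.1 hpre.2
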